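-- pv_equiv track=rewrite | github.com/InsightLab/PyMove | utils/utils.py | array_stats
-- ===== SOURCE A (Python) =====
-- def array_stats(values_array):
--     sum1 = 0
--     sum_sq = 0
--     n = 0
--     for item in values_array:
--         sum1 += item
--         sum_sq += item * item
--         n += 1
--
--     return sum1, sum_sq, n
-- ===== SOURCE B (Python) =====
-- def array_stats(values_array):
--     def go(vals):
--         if not vals:
--             return (0, 0, 0)
--         if len(vals) == 1:
--             x = vals[0]
--             return (x, x * x, 1)
--         m = len(vals) // 2
--         s1, q1, n1 = go(vals[:m])
--         s2, q2, n2 = go(vals[m:])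
--         return (s1 + s2, q1 + q2, n1 + n2)
--     return go(list(values_array))
-- ===== Notes on version B (the rewrite author's own statement) =====
-- stated objective: alternative
-- what changed: Replaced A's single fused accumulator loop with a divide-and-conquer recursion that splits the list in halves and combines (sum, sum-of-squares, count) from the two halves.
import Mathlib
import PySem

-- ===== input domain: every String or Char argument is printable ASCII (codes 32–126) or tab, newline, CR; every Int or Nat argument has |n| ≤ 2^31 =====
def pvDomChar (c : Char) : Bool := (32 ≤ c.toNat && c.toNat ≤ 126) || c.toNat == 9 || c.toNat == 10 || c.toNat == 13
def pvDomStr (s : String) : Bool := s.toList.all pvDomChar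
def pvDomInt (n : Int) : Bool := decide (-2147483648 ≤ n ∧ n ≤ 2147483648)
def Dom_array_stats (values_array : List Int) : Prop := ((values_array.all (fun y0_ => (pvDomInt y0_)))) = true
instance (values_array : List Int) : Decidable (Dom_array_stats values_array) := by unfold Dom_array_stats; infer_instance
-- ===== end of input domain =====

-- B replaces A's fused accumulator loop with a divide-and-conquer recursion over list halves; objective: alternative.


-- ===== PORT A =====
-- A: one fused loop maintaining (sum, sum of squares, count)
def array_stats (values_array : List Int) : Int × Int × Int :=
  values_array.foldl (fun acc item => (acc.1 + item, acc.2.1 + item * item, acc.2.2 + 1))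
    (0, 0, 0)

-- ===== PORT B =====
-- B's inner 'go': split at the midpoint, recurse on the two halves, add the triples
def asGo : List Int → Int × Int × Int
  | [] => (0, 0, 0)
  | [x] => (x, x * x, 1)
  | x :: y :: rest =>
      let l := x :: y :: rest
      let m := l.length / 2
      let a := asGo (l.take m)
      let b := asGo (l.drop m)
      (a.1 + b.1, a.2.1 + b.2.1, a.2.2 + b.2.2)
termination_by l => l.length
decreasing_by
  · simp [List.length_take]; omega
  · simp [List.length_drop]; omega

def array_stats_alt (values_array : List Int) : Int × Int × Int :=
  asGo values_array

-- ===== PRECONDITION & SPEC =====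
def Spec_array_stats (values_array : List Int) (out : Int × Int × Int) : Prop := out = array_stats_alt values_array
instance (values_array : List Int) (out : Int × Int × Int) : Decidable (Spec_array_stats values_array out) := by unfold Spec_array_stats; infer_instance

-- ===== CLAIM (what is proved, stated in full; the proofs are below) =====
def Claim_equal_array_stats : Prop := ∀ (values_array : List Int), Dom_array_stats values_array → Spec_array_stats values_array (array_stats values_array)

-- ===== LEMMAS AND PROOFS =====
theorem asGo_eq (l : List Int) :
    asGo l = (l.sum, (l.map (fun x => x * x)).sum, (l.length : Int)) := by
  induction l using asGo.induct with
  | case1 => simp [asGo]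
  | case2 x => simp [asGo]
  | case3 x y rest lv mv ihTake ihDrop =>
      simp only [asGo]
      simp only [lv, mv] at ihTake ihDrop
      rw [ihTake, ihDrop]
      have hsplit : (x :: y :: rest).take ((x :: y :: rest).length / 2)
          ++ (x :: y :: rest).drop ((x :: y :: rest).length / 2) = x :: y :: rest :=
        List.take_append_drop _ _
      refine Prod.ext ?_ (Prod.ext ?_ ?_) <;> dsimp only
      · rw [← List.sum_append, hsplit]
      · rw [← List.sum_append, ← List.map_append, hsplit]
      · simp [List.length_take, List.length_drop]
        push_cast
        omega

theorem array_stats_foldl (l : List Int) (s q n : Int) :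
    l.foldl (fun acc item => (acc.1 + item, acc.2.1 + item * item, acc.2.2 + 1)) (s, q, n)
      = (s + l.sum, q + (l.map (fun x => x * x)).sum, n + (l.length : Int)) := by
  induction l generalizing s q n with
  | nil => simp
  | cons x xs ih =>
      simp [List.foldl, ih, List.sum_cons]
      refine ⟨by ring, by ring, by ring⟩

-- ===== VERDICT (by name: the statement is the Claim_ definition above) =====
theorem array_stats_spec : Claim_equal_array_stats := by
  intro values_array _
  unfold Spec_array_stats array_stats array_stats_alt
  rw [asGo_eq, array_stats_foldl]
  simp
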